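-- pv_equiv track=rewrite | github.com/michalvalco/ITSERR-RESILIENCE-Project | 03_prototype/stockel_annotation/scripts/zero_shot_crf_experiment.py | tokenize_for_crf
-- ===== SOURCE A (Python) =====
-- def tokenize_for_crf(text: str) -> list[tuple[str, int, int]]:
--     """
--     Tokenise text for CRF features, preserving character offsets.
--
--     Uses simple whitespace + punctuation splitting consistent with GNORM.
--     Returns list of (token_text, start_offset, end_offset).
--     """
--     tokens = []
--     i = 0
--     n = len(text)
--     while i < n:
--         # Skip whitespace
--         while i < n and text[i].isspace():
--             i += 1
--         if i >= n:
--             break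
--
--         start = i
--         char = text[i]
--
--         # Single-character punctuation tokens
--         if char in ".,;:!?()[]{}«»–—\"'§†‡<>/":
--             tokens.append((char, start, start + 1))
--             i += 1
--         else:
--             # Alphanumeric or other runs
--             while (i < n and not text[i].isspace()
--                    and text[i] not in ".,;:!?()[]{}«»–—\"'§†‡<>/"):
--                 i += 1
--             tokens.append((text[start:i], start, i))
--
--     return tokens
-- ===== SOURCE B (Python) =====
-- PUNCT = set(".,;:!?()[]{}\u00ab\u00bb\u2013\u2014\"'\u00a7\u2020\u2021<>/")
--
-- def tokenize_for_crf(text: str) -> list[tuple[str, int, int]]: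
--     """One-pass state machine: accumulate the current run in a buffer,
--     flushing it at whitespace or punctuation; punctuation emits its own token."""
--     tokens = []
--     buf = []
--     start = 0
--     for i, ch in enumerate(text):
--         if ch.isspace() or ch in PUNCT:
--             if buf:
--                 tokens.append((''.join(buf), start, i))
--                 buf = []
--             if ch in PUNCT:
--                 tokens.append((ch, i, i + 1))
--         else:
--             if not buf:
--                 start = i
--             buf.append(ch)
--     if buf:
--         tokens.append((''.join(buf), start, len(text)))
--     return tokens
-- ===== Notes on version B (the rewrite author's own statement) =====
-- stated objective: idiomatic
-- what changed: Replaced A's nested index-based while loops (skip-whitespace scan plus inner run scan with slicing) by a single linear pass over enumerate(text) with a buffer state machine that flushes the current run at whitespace/punctuation.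
import Mathlib
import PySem

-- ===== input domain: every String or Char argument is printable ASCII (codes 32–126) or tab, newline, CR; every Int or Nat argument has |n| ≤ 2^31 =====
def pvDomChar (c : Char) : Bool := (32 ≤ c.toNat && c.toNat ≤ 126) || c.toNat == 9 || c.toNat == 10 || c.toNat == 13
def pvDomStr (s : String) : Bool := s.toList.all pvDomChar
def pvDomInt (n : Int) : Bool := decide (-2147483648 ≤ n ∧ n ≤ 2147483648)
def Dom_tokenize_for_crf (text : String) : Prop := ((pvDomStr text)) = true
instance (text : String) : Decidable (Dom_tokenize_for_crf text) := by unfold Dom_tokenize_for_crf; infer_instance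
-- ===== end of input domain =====

-- B replaces A's nested index-while loops with a single-pass buffer state machine (idiomatic/alternative; same O(n) cost).
-- ===== PORT A =====
-- A skips whitespace, emits single-char punctuation tokens, and scans runs of
-- other characters with an inner while loop (ported as pvTakeRun, a span).
def pvPunct : List Char := ['.', ',', ';', ':', '!', '?', '(', ')', '[', ']', '{', '}', '«', '»', '–', '—', '"', '\'', '§', '†', '‡', '<', '>', '/']

def pvTakeRun (cs : List Char) : List Char × List Char :=
  match cs with
  | [] => ([], [])
  | c :: rest =>
    if PySem.Chars.isspace c || pvPunct.contains c then ([], c :: rest)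
    else
      let p := pvTakeRun rest
      (c :: p.1, p.2)

theorem pvTakeRun_snd_length_le (cs : List Char) : (pvTakeRun cs).2.length ≤ cs.length := by
  induction cs with
  | nil => simp [pvTakeRun]
  | cons c rest ih =>
    simp only [pvTakeRun]
    split
    · simp
    · simpa using Nat.le_succ_of_le ih

def pvTokA (cs : List Char) (i : Nat) : List (String × Int × Int) :=
  match cs with
  | [] => []
  | c :: rest =>
    if PySem.Chars.isspace c then pvTokA rest (i + 1)
    else if pvPunct.contains c then
      (String.ofList [c], (i : Int), (i : Int) + 1) :: pvTokA rest (i + 1)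
    else
      let p := pvTakeRun rest
      (String.ofList (c :: p.1), (i : Int), (i : Int) + 1 + p.1.length) ::
        pvTokA p.2 (i + 1 + p.1.length)
  termination_by cs.length
  decreasing_by
    · simp
    · simp
    · simpa using Nat.lt_succ_of_le (pvTakeRun_snd_length_le rest)

def tokenize_for_crf (text : String) : List (String × Int × Int) := pvTokA text.toList 0

-- ===== PORT B =====
-- B is a one-pass state machine over (index, char): it keeps the current run in
-- a buffer, flushes at whitespace/punctuation, and punctuation emits its own token.
def pvTokB (cs : List Char) (i start : Nat) (buf : List Char) : List (String × Int × Int) :=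
  match cs with
  | [] => if buf.isEmpty then [] else [(String.ofList buf, (start : Int), (i : Int))]
  | c :: rest =>
    if PySem.Chars.isspace c || pvPunct.contains c then
      (if buf.isEmpty then [] else [(String.ofList buf, (start : Int), (i : Int))]) ++
      (if pvPunct.contains c then [(String.ofList [c], (i : Int), (i : Int) + 1)] else []) ++
      pvTokB rest (i + 1) start []
    else
      pvTokB rest (i + 1) (if buf.isEmpty then i else start) (buf ++ [c])

def tokenize_for_crf_alt (text : String) : List (String × Int × Int) := pvTokB text.toList 0 0 []

-- ===== PRECONDITION & SPEC =====
def Spec_tokenize_for_crf (text : String) (out : List (String × Int × Int)) : Prop := out = tokenize_for_crf_alt text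
instance (text : String) (out : List (String × Int × Int)) : Decidable (Spec_tokenize_for_crf text out) := by unfold Spec_tokenize_for_crf; infer_instance

-- ===== CLAIM (what is proved, stated in full; the proofs are below) =====
def Claim_equal_tokenize_for_crf : Prop := ∀ (text : String), Dom_tokenize_for_crf text → Spec_tokenize_for_crf text (tokenize_for_crf text)

-- ===== LEMMAS AND PROOFS =====
-- No punctuation character is a whitespace character.
theorem pvPunct_not_space : ∀ c ∈ pvPunct, PySem.Chars.isspace c = false := by
  intro c hc; fin_cases hc <;> decide

-- With an empty buffer, B's stale run-start is irrelevant.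
theorem pvTokB_start_irrel (cs : List Char) (i s s' : Nat) :
    pvTokB cs i s ([] : List Char) = pvTokB cs i s' ([] : List Char) := by
  induction cs generalizing i with
  | nil => simp [pvTokB]
  | cons c rest ih =>
    simp only [pvTokB]
    split
    · simp [ih]
    · rfl

-- With a nonempty buffer, B finishes the current run exactly as pvTakeRun describes.
theorem pvTokB_run (cs : List Char) (i s : Nat) (buf : List Char) (h : buf.isEmpty = false) :
    pvTokB cs i s buf =
      (String.ofList (buf ++ (pvTakeRun cs).1), (s : Int), (i : Int) + (pvTakeRun cs).1.length) ::
        pvTokB (pvTakeRun cs).2 (i + (pvTakeRun cs).1.length) s ([] : List Char) := by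
  induction cs generalizing i buf with
  | nil => simp [pvTokB, pvTakeRun, h]
  | cons c rest ih =>
    by_cases hsp : PySem.Chars.isspace c
    · have hpm : c ∉ pvPunct := fun hm => by
        simp [pvPunct_not_space c hm] at hsp
      rw [show pvTakeRun (c :: rest) = ([], c :: rest) from by simp [pvTakeRun, hsp]]
      rw [show pvTokB (c :: rest) i s buf =
          (String.ofList buf, (s : Int), (i : Int)) :: pvTokB rest (i + 1) s [] from by
        simp [pvTokB, hsp, hpm, h]]
      simp [pvTokB, hsp, hpm]
    · by_cases hpm : c ∈ pvPunct
      · rw [show pvTakeRun (c :: rest) = ([], c :: rest) from by simp [pvTakeRun, hpm]]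
        rw [show pvTokB (c :: rest) i s buf =
            (String.ofList buf, (s : Int), (i : Int)) ::
              (String.ofList [c], (i : Int), (i : Int) + 1) :: pvTokB rest (i + 1) s [] from by
          simp [pvTokB, hsp, hpm, h]]
        simp [pvTokB, hsp, hpm]
      · have h1 : (pvTakeRun (c :: rest)).1 = c :: (pvTakeRun rest).1 := by
          simp [pvTakeRun, hsp, hpm]
        have h2 : (pvTakeRun (c :: rest)).2 = (pvTakeRun rest).2 := by
          simp [pvTakeRun, hsp, hpm]
        rw [h1, h2, show pvTokB (c :: rest) i s buf = pvTokB rest (i + 1) s (buf ++ [c]) from by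
          simp [pvTokB, hsp, hpm, h]]
        rw [ih (i + 1) (buf ++ [c]) (by simp)]
        refine List.cons_eq_cons.mpr ⟨?_, ?_⟩
        · simp only [Prod.mk.injEq, List.append_assoc, List.singleton_append, List.length_cons]
          and_intros <;> try rfl
          all_goals push_cast
          all_goals ring
        · simp only [List.length_cons]
          congr 1
          all_goals omega

-- A and B agree on every suffix, at every index, for any (irrelevant) run-start.
theorem pvTokA_eq_pvTokB (cs : List Char) (i s : Nat) :
    pvTokA cs i = pvTokB cs i s ([] : List Char) := by
  induction hn : cs.length using Nat.strong_induction_on generalizing cs i with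
  | _ n ih =>
  match cs with
  | [] => simp [pvTokA, pvTokB]
  | c :: rest =>
    have hrest : rest.length < n := by simp only [List.length_cons] at hn; omega
    by_cases hsp : PySem.Chars.isspace c
    · have hpm : c ∉ pvPunct := fun hm => by
        simp [pvPunct_not_space c hm] at hsp
      rw [show pvTokA (c :: rest) i = pvTokA rest (i + 1) from by simp [pvTokA, hsp]]
      rw [show pvTokB (c :: rest) i s ([] : List Char) = pvTokB rest (i + 1) s [] from by
        simp [pvTokB, hsp, hpm]]
      exact ih rest.length hrest rest (i + 1) rfl
    · by_cases hpm : c ∈ pvPunct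
      · rw [show pvTokA (c :: rest) i =
            (String.ofList [c], (i : Int), (i : Int) + 1) :: pvTokA rest (i + 1) from by
          simp [pvTokA, hsp, hpm]]
        rw [show pvTokB (c :: rest) i s ([] : List Char) =
            (String.ofList [c], (i : Int), (i : Int) + 1) :: pvTokB rest (i + 1) s [] from by
          simp [pvTokB, hsp, hpm]]
        rw [ih rest.length hrest rest (i + 1) rfl]
      · rw [show pvTokA (c :: rest) i =
            (String.ofList (c :: (pvTakeRun rest).1), (i : Int),
              (i : Int) + 1 + (pvTakeRun rest).1.length) ::
              pvTokA (pvTakeRun rest).2 (i + 1 + (pvTakeRun rest).1.length) from by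
          simp [pvTokA, hsp, hpm]]
        rw [show pvTokB (c :: rest) i s ([] : List Char) = pvTokB rest (i + 1) i [c] from by
          simp [pvTokB, hsp, hpm]]
        rw [pvTokB_run rest (i + 1) i [c] (by simp)]
        have hlen := pvTakeRun_snd_length_le rest
        rw [ih (pvTakeRun rest).2.length (by omega) _ (i + 1 + (pvTakeRun rest).1.length) rfl]
        refine List.cons_eq_cons.mpr ⟨?_, ?_⟩
        · simp only [Prod.mk.injEq, List.singleton_append]
          and_intros <;> try rfl
          all_goals push_cast
        · rw [pvTokB_start_irrel _ _ i s]

-- ===== VERDICT (by name: the statement is the Claim_ definition above) =====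
theorem tokenize_for_crf_spec : Claim_equal_tokenize_for_crf := by
  intro text _
  unfold Spec_tokenize_for_crf tokenize_for_crf tokenize_for_crf_alt
  exact pvTokA_eq_pvTokB text.toList 0 0
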